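-- pv_equiv track=rewrite | github.com/jmp75/pyela | ela/textproc.py | find_secondary_lithology
-- ===== SOURCE A (Python) =====
-- def find_secondary_lithology(tokens_and_primary, lithologies_adjective_dict, lithologies_dict):
--     """Find a secondary lithology in a tokenised sentence.
--
--     Args:
--         tokens_and_primary (tuple ([str],str): tokens and the primary lithology
--         lithologies_adjective_dict (dict): dictionary, where keys are exact, "clear" markers for secondary lithologies (e.g. 'clayey'). Keys are the lithology classes.
--         lithologies_dict (dict): dictionary, where keys are exact markers as match for lithologies. Keys are the lithology classes.
--
--     Returns:
--         str: secondary lithology if dectected. empty string for none.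
--
--     """
--     tokens, prim_litho = tokens_and_primary
--     if prim_litho == '': # cannot have a secondary lithology if no primary
--         return ''
--     # first, let's look at adjectives, more likely to semantically mean a secondary lithology
--     keys = lithologies_adjective_dict.keys()
--     for x in tokens:
--         if x in keys:
--             litho_class = lithologies_adjective_dict[x]
--             if litho_class != prim_litho:
--                 return litho_class
--     # then, as a fallback let's look at a looser set of terms to find a secondary lithology
--     keys = lithologies_dict.keys()
--     for x in tokens:
--         if x in keys:
--             litho_class = lithologies_dict[x]
--             if litho_class != prim_litho:
--                 return litho_class
--     return ''
-- ===== SOURCE B (Python) =====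
-- def find_secondary_lithology(tokens_and_primary, lithologies_adjective_dict, lithologies_dict):
--     tokens, prim_litho = tokens_and_primary
--     if prim_litho == '':
--         return ''
--     adj_match = None
--     fallback_match = None
--     for x in tokens:
--         if adj_match is None:
--             c = lithologies_adjective_dict.get(x)
--             if c is not None and c != prim_litho:
--                 adj_match = c
--         if fallback_match is None:
--             c = lithologies_dict.get(x)
--             if c is not None and c != prim_litho:
--                 fallback_match = c
--     if adj_match is not None:
--         return adj_match
--     if fallback_match is not None:
--         return fallback_match
--     return ''
-- ===== Notes on version B (the rewrite author's own statement) =====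
-- stated objective: alternative
-- what changed: Replaced A's two sequential scans of the token list (adjective dict first, then fallback dict) by a single pass that maintains two deferred candidates (first valid adjective match, first valid fallback match) and selects between them after the loop.
import Mathlib
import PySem

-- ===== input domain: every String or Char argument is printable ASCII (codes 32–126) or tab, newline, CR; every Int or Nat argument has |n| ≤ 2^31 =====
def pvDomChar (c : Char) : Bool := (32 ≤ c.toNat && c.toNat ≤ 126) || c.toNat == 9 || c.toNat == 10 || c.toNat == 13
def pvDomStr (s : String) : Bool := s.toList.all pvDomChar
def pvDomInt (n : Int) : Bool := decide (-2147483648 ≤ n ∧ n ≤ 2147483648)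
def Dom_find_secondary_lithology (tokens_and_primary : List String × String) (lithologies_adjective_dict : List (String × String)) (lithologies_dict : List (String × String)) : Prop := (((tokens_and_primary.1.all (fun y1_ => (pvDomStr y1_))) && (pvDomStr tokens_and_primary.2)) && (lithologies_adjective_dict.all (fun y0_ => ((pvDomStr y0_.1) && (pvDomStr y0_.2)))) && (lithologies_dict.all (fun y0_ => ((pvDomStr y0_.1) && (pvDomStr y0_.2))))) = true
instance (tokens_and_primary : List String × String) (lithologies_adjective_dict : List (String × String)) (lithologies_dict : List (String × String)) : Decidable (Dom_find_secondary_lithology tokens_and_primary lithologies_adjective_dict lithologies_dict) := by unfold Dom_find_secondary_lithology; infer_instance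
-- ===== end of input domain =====

-- B replaces A's two sequential token scans by a single pass keeping two deferred candidates (alternative decomposition, same cost).


-- ===== PORT A =====
-- B changes the decomposition: one pass with two deferred candidates instead of A's two sequential scans.
-- loop body of A: scan tokens, return the first whose dict class differs from prim (none if the loop falls through)
def pvScanA (d : PySem.Dict String String) (prim : String) : List String → Option String
  | [] => none
  | x :: xs =>
    match d.get? x with
    | some c => if c ≠ prim then some c else pvScanA d prim xs
    | none => pvScanA d prim xs

def find_secondary_lithology (tokens_and_primary : List String × String) (lithologies_adjective_dict : List (String × String)) (lithologies_dict : List (String × String)) : String :=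
  let tokens := tokens_and_primary.1
  let prim_litho := tokens_and_primary.2
  if prim_litho = "" then ""
  else
    match pvScanA (PySem.Dict.ofList lithologies_adjective_dict) prim_litho tokens with
    | some c => c
    | none =>
      match pvScanA (PySem.Dict.ofList lithologies_dict) prim_litho tokens with
      | some c => c
      | none => ""

-- ===== PORT B =====
-- one step of B's single loop: update the two candidates
def pvStepB (adj fb : PySem.Dict String String) (prim : String) (st : Option String × Option String) (x : String) : Option String × Option String :=
  let a := match st.1 with
    | some v => some v
    | none =>
      match adj.get? x with
      | some c => if c ≠ prim then some c else none
      | none => none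
  let b := match st.2 with
    | some v => some v
    | none =>
      match fb.get? x with
      | some c => if c ≠ prim then some c else none
      | none => none
  (a, b)

def find_secondary_lithology_alt (tokens_and_primary : List String × String) (lithologies_adjective_dict : List (String × String)) (lithologies_dict : List (String × String)) : String :=
  let tokens := tokens_and_primary.1
  let prim_litho := tokens_and_primary.2
  if prim_litho = "" then ""
  else
    let st := tokens.foldl (pvStepB (PySem.Dict.ofList lithologies_adjective_dict) (PySem.Dict.ofList lithologies_dict) prim_litho) (none, none)
    match st.1 with
    | some v => v
    | none =>
      match st.2 with
      | some v => v
      | none => ""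

-- ===== PRECONDITION & SPEC =====
def Spec_find_secondary_lithology (tokens_and_primary : List String × String) (lithologies_adjective_dict : List (String × String)) (lithologies_dict : List (String × String)) (out : String) : Prop := out = find_secondary_lithology_alt tokens_and_primary lithologies_adjective_dict lithologies_dict
instance (tokens_and_primary : List String × String) (lithologies_adjective_dict : List (String × String)) (lithologies_dict : List (String × String)) (out : String) : Decidable (Spec_find_secondary_lithology tokens_and_primary lithologies_adjective_dict lithologies_dict out) := by unfold Spec_find_secondary_lithology; infer_instance

-- ===== CLAIM =====
def Claim_equal_find_secondary_lithology : Prop := ∀ (tokens_and_primary : List String × String) (lithologies_adjective_dict : List (String × String)) (lithologies_dict : List (String × String)), Dom_find_secondary_lithology tokens_and_primary lithologies_adjective_dict lithologies_dict → Spec_find_secondary_lithology tokens_and_primary lithologies_adjective_dict lithologies_dict (find_secondary_lithology tokens_and_primary lithologies_adjective_dict lithologies_dict)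

-- ===== LEMMAS AND PROOFS =====
-- B's fold, started from any state, computes A's two scans (with already-found candidates kept)
theorem foldl_stepB (adj fb : PySem.Dict String String) (prim : String) (ts : List String) (a b : Option String) :
    ts.foldl (pvStepB adj fb prim) (a, b)
      = (a.orElse (fun _ => pvScanA adj prim ts), b.orElse (fun _ => pvScanA fb prim ts)) := by
  induction ts generalizing a b with
  | nil => cases a <;> cases b <;> simp [Option.orElse, pvScanA]
  | cons x xs ih =>
    simp only [List.foldl_cons]
    rw [show pvStepB adj fb prim (a, b) x
        = (Option.orElse a (fun _ => match adj.get? x with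
            | some c => if c ≠ prim then some c else none
            | none => none),
           Option.orElse b (fun _ => match fb.get? x with
            | some c => if c ≠ prim then some c else none
            | none => none)) from by
          cases a <;> cases b <;> simp [pvStepB, Option.orElse]]
    rw [ih]
    simp only [Prod.mk.injEq]
    constructor
    · rcases a with _ | v
      · simp only [Option.orElse, pvScanA]
        rcases h : PySem.Dict.get? adj x with _ | c
        · simp
        · by_cases hc : c = prim <;> simp [hc]
      · simp [Option.orElse]
    · rcases b with _ | v
      · simp only [Option.orElse, pvScanA]
        rcases h : PySem.Dict.get? fb x with _ | c
        · simp
        · by_cases hc : c = prim <;> simp [hc]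
      · simp [Option.orElse]

-- ===== VERDICT =====
theorem find_secondary_lithology_spec : Claim_equal_find_secondary_lithology := by
  intro ⟨tokens, prim⟩ adjd fbd _
  unfold Spec_find_secondary_lithology find_secondary_lithology find_secondary_lithology_alt
  by_cases h : prim = ""
  · simp [h]
  · simp only [h]
    rw [foldl_stepB]
    rcases pvScanA (PySem.Dict.ofList adjd) prim tokens with _ | c <;>
      rcases pvScanA (PySem.Dict.ofList fbd) prim tokens with _ | c2 <;>
      simp [Option.orElse]
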